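-- pv_equiv track=rewrite | github.com/jotaboyev0717/assignments | week_6_assignment/main.py | find_top_earning_event
-- ===== SOURCE A (Python) =====
-- def find_top_earning_event(events):
--     if len(events) == 0:
--         return None
--
--     max_revenue = events[0][3]
--     top_event_id = events[0][0]
--
--     for event in events:
--         if event[3] > max_revenue:
--             max_revenue = event[3]
--             top_event_id = event[0]
--         elif event[3] == max_revenue:
--             if event[0] < top_event_id:
--                 top_event_id = event[0]
--
--     return top_event_id
-- ===== SOURCE B (Python) =====
-- def find_top_earning_event(events):
--     if not events:
--         return None
--     return sorted(events, key=lambda e: (-e[3], e[0]))[0][0]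
-- ===== Notes on version B (the rewrite author's own statement) =====
-- stated objective: idiomatic
-- what changed: Replaces the manual running-max/tie-break scan with a full stable sort by the composite key (-revenue, id) and reads off the first element's id.
import Mathlib
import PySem

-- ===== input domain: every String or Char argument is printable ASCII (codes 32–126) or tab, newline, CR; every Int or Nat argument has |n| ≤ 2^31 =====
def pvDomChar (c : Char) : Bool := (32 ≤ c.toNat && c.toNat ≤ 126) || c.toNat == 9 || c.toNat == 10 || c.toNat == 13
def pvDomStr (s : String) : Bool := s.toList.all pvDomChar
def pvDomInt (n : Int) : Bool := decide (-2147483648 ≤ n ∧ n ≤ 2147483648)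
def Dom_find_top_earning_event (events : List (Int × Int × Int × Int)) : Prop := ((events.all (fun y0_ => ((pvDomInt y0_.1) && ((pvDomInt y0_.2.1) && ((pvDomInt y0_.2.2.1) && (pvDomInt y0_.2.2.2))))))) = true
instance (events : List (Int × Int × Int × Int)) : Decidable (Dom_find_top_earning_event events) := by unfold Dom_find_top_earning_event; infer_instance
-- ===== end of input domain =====

-- B replaces A's single-pass running-max/tie-break scan with a stable sort by the
-- composite key (-revenue, id) followed by reading off the first element's id (idiomatic).


-- ===== PORT A =====
-- the body of A's for-loop over the state (max_revenue, top_event_id)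
def pvStep (acc : Int × Int) (event : Int × Int × Int × Int) : Int × Int :=
  if event.2.2.2 > acc.1 then (event.2.2.2, event.1)
  else if event.2.2.2 == acc.1 then
    (if event.1 < acc.2 then (acc.1, event.1) else acc)
  else acc

def find_top_earning_event (events : List (Int × Int × Int × Int)) : Option Int :=
  match events with
  | [] => none
  | e0 :: _ =>
    -- max_revenue = events[0][3]; top_event_id = events[0][0]; then the loop over events
    some (events.foldl pvStep (e0.2.2.2, e0.1)).2

-- ===== PORT B =====
def find_top_earning_event_alt (events : List (Int × Int × Int × Int)) : Option Int :=
  if events.isEmpty then none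
  else
    -- sorted(events, key=lambda e: (-e[3], e[0]))[0][0]; the [0] is on a list that is
    -- nonempty here (a permutation of the nonempty input), so the match's [] arm is unreachable
    match PySem.List.sorted2 events (fun e => -e.2.2.2) (fun e => e.1) with
    | [] => none
    | m :: _ => some m.1

-- ===== PRECONDITION & SPEC =====
def Spec_find_top_earning_event (events : List (Int × Int × Int × Int)) (out : Option Int) : Prop := out = find_top_earning_event_alt events
instance (events : List (Int × Int × Int × Int)) (out : Option Int) : Decidable (Spec_find_top_earning_event events out) := by unfold Spec_find_top_earning_event; infer_instance

-- ===== CLAIM (what is proved, stated in full; the proofs are below) =====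
def Claim_equal_find_top_earning_event : Prop := ∀ (events : List (Int × Int × Int × Int)), Dom_find_top_earning_event events → Spec_find_top_earning_event events (find_top_earning_event events)

-- ===== LEMMAS AND PROOFS =====

-- the strict "comes before" test used by sorted2 with key (-revenue, id)
def pvLtb (a b : Int × Int × Int × Int) : Bool :=
  decide (-a.2.2.2 < -b.2.2.2) || (!decide (-b.2.2.2 < -a.2.2.2) && decide (a.1 < b.1))

theorem pvLtb_true_iff (a b : Int × Int × Int × Int) :
    pvLtb a b = true ↔ (b.2.2.2 < a.2.2.2 ∨ (b.2.2.2 = a.2.2.2 ∧ a.1 < b.1)) := by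
  simp [pvLtb]; omega

theorem pvLtb_false_iff (a b : Int × Int × Int × Int) :
    pvLtb a b = false ↔ (a.2.2.2 < b.2.2.2 ∨ (a.2.2.2 = b.2.2.2 ∧ b.1 ≤ a.1)) := by
  simp [pvLtb]; omega

theorem pv_sorted2_eq_foldl (events : List (Int × Int × Int × Int)) :
    PySem.List.sorted2 events (fun e => -e.2.2.2) (fun e => e.1) =
      events.foldl (fun acc x => PySem.List.insertBy pvLtb x acc) [] := rfl

-- inserting into a list whose head is pvLtb-minimal keeps the head pvLtb-minimal
theorem pv_insert_head (x : Int × Int × Int × Int) (acc : List (Int × Int × Int × Int))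
    (hacc : ∀ m t, acc = m :: t → ∀ y ∈ acc, pvLtb y m = false) :
    ∀ m t, PySem.List.insertBy pvLtb x acc = m :: t →
      ∀ y ∈ PySem.List.insertBy pvLtb x acc, pvLtb y m = false := by
  cases acc with
  | nil =>
    have hnil : PySem.List.insertBy pvLtb x [] = [x] := by simp [PySem.List.insertBy]
    rw [hnil]
    intro m t heq y hy
    rw [List.cons.injEq] at heq
    rw [List.mem_singleton] at hy
    subst hy; rw [← heq.1, pvLtb_false_iff]; omega
  | cons a l =>
    by_cases hlt : pvLtb x a = true
    · have hT : PySem.List.insertBy pvLtb x (a :: l) = x :: a :: l := by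
        simp [PySem.List.insertBy, hlt]
      rw [hT]
      intro m t heq y hy
      rw [List.cons.injEq] at heq
      obtain ⟨hm, -⟩ := heq; subst hm
      rw [pvLtb_true_iff] at hlt
      rcases List.mem_cons.mp hy with hy | hy
      · subst hy; rw [pvLtb_false_iff]; omega
      · rcases List.mem_cons.mp hy with hy | hy
        · subst hy; rw [pvLtb_false_iff]; omega
        · have := pvLtb_false_iff y a |>.mp (hacc a l rfl y (List.mem_cons_of_mem a hy))
          rw [pvLtb_false_iff]; omega
    · rw [Bool.not_eq_true] at hlt
      have hF : PySem.List.insertBy pvLtb x (a :: l) = a :: PySem.List.insertBy pvLtb x l := by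
        simp [PySem.List.insertBy, hlt]
      rw [hF]
      intro m t heq y hy
      rw [List.cons.injEq] at heq
      obtain ⟨hm, -⟩ := heq; subst hm
      rcases List.mem_cons.mp hy with hy | hy
      · subst hy; rw [pvLtb_false_iff]; omega
      · rcases (PySem.List.mem_insertBy pvLtb x y l).mp hy with hy' | hy'
        · subst hy'; exact hlt
        · exact hacc a l rfl y (List.mem_cons_of_mem a hy')

-- the head of the insertion fold is pvLtb-minimal among its members
theorem pv_foldl_head (xs : List (Int × Int × Int × Int)) :
    ∀ acc : List (Int × Int × Int × Int),
      (∀ m t, acc = m :: t → ∀ y ∈ acc, pvLtb y m = false) →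
      ∀ m t, xs.foldl (fun a x => PySem.List.insertBy pvLtb x a) acc = m :: t →
        ∀ y ∈ xs.foldl (fun a x => PySem.List.insertBy pvLtb x a) acc, pvLtb y m = false := by
  induction xs with
  | nil => intro acc hacc; simpa using hacc
  | cons x xs ih =>
    intro acc hacc
    simp only [List.foldl_cons]
    exact ih _ (pv_insert_head x acc hacc)

-- characterisation of A's loop: it computes the (-revenue, id)-lexicographic minimum
theorem pv_fold_min (l : List (Int × Int × Int × Int)) :
    ∀ r i : Int, ∃ R I : Int, l.foldl pvStep (r, i) = (R, I) ∧
      ((R = r ∧ I = i) ∨ ∃ x ∈ l, x.2.2.2 = R ∧ x.1 = I) ∧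
      (r < R ∨ (r = R ∧ I ≤ i)) ∧
      (∀ x ∈ l, x.2.2.2 < R ∨ (x.2.2.2 = R ∧ I ≤ x.1)) := by
  induction l with
  | nil =>
    intro r i
    exact ⟨r, i, rfl, Or.inl ⟨rfl, rfl⟩, Or.inr ⟨rfl, le_refl _⟩, by simp⟩
  | cons x l ih =>
    intro r i
    obtain ⟨R, I, heq, hw, hle, hall⟩ := ih (pvStep (r, i) x).1 (pvStep (r, i) x).2
    have hstep : pvStep (r, i) x = ((pvStep (r, i) x).1, (pvStep (r, i) x).2) := rfl
    have hs1 : r < (pvStep (r, i) x).1 ∨ (r = (pvStep (r, i) x).1 ∧ (pvStep (r, i) x).2 ≤ i) := by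
      simp only [pvStep, beq_iff_eq]; split_ifs <;> simp <;> omega
    have hs2 : x.2.2.2 < (pvStep (r, i) x).1 ∨
        (x.2.2.2 = (pvStep (r, i) x).1 ∧ (pvStep (r, i) x).2 ≤ x.1) := by
      simp only [pvStep, beq_iff_eq]; split_ifs <;> simp <;> omega
    have hs3 : ((pvStep (r, i) x).1 = r ∧ (pvStep (r, i) x).2 = i) ∨
        ((pvStep (r, i) x).1 = x.2.2.2 ∧ (pvStep (r, i) x).2 = x.1) ∨
        ((pvStep (r, i) x).1 = r ∧ (pvStep (r, i) x).2 = x.1 ∧ x.2.2.2 = r) := by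
      simp only [pvStep, beq_iff_eq]; split_ifs <;> simp <;> omega
    refine ⟨R, I, by simp only [List.foldl_cons]; rw [hstep]; exact heq, ?_, ?_, ?_⟩
    · rcases hw with ⟨h1, h2⟩ | ⟨y, hy, h1, h2⟩
      · rcases hs3 with ⟨h3, h4⟩ | ⟨h3, h4⟩ | ⟨h3, h4⟩
        · exact Or.inl ⟨by omega, by omega⟩
        · exact Or.inr ⟨x, List.mem_cons_self, by omega, by omega⟩
        · -- tie kept the old revenue but took x's id: x's revenue equals r here
          obtain ⟨h5, h6⟩ := h4
          exact Or.inr ⟨x, List.mem_cons_self, by omega, by omega⟩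
      · exact Or.inr ⟨y, List.mem_cons_of_mem x hy, h1, h2⟩
    · rcases hs1 with h1 | ⟨h1, h2⟩ <;> rcases hle with h3 | ⟨h3, h4⟩ <;> omega
    · intro y hy
      rcases List.mem_cons.mp hy with hy | hy
      · subst hy
        rcases hs2 with h1 | ⟨h1, h2⟩ <;> rcases hle with h3 | ⟨h3, h4⟩ <;> omega
      · exact hall y hy

-- ===== VERDICT (by name: the statement is the Claim_ definition above) =====
theorem find_top_earning_event_spec : Claim_equal_find_top_earning_event := by
  unfold Claim_equal_find_top_earning_event
  intro events _
  unfold Spec_find_top_earning_event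
  cases events with
  | nil => rfl
  | cons e0 rest =>
    have hperm := PySem.List.sorted2_perm (e0 :: rest) (fun e => -e.2.2.2) (fun e => e.1) false
    obtain ⟨m, t, hmt⟩ : ∃ m t,
        PySem.List.sorted2 (e0 :: rest) (fun e => -e.2.2.2) (fun e => e.1) = m :: t := by
      cases h : PySem.List.sorted2 (e0 :: rest) (fun e => -e.2.2.2) (fun e => e.1) with
      | nil => rw [h] at hperm; exact absurd hperm.symm (by simp)
      | cons a b => exact ⟨a, b, rfl⟩
    have hmem : m ∈ (e0 :: rest) := hperm.mem_iff.mp (by rw [hmt]; simp)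
    have hmin : ∀ y ∈ (e0 :: rest), pvLtb y m = false := by
      intro y hy
      have hy' : y ∈ PySem.List.sorted2 (e0 :: rest) (fun e => -e.2.2.2) (fun e => e.1) :=
        hperm.mem_iff.mpr hy
      rw [pv_sorted2_eq_foldl] at hmt hy'
      exact pv_foldl_head (e0 :: rest) [] (by intro _ _ h; simp at h) m t hmt y hy'
    obtain ⟨R, I, heq, hw, -, hall⟩ := pv_fold_min (e0 :: rest) e0.2.2.2 e0.1
    obtain ⟨x, hx, hxR, hxI⟩ : ∃ x ∈ (e0 :: rest), x.2.2.2 = R ∧ x.1 = I := by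
      rcases hw with ⟨h1, h2⟩ | h
      · exact ⟨e0, List.mem_cons_self, h1.symm, h2.symm⟩
      · exact h
    have h1 := hall m hmem
    have h2 := pvLtb_false_iff x m |>.mp (hmin x hx)
    have h3 : I = m.1 := by omega
    show find_top_earning_event (e0 :: rest) = find_top_earning_event_alt (e0 :: rest)
    simp only [find_top_earning_event, find_top_earning_event_alt, List.isEmpty_cons,
      Bool.false_eq_true, if_false, hmt, heq, h3]
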